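-- pv_equiv track=rewrite | github.com/akuazuk/protocol | eval/retrieval_checks.py | check_must_substrings
-- ===== SOURCE A (Python) =====
-- def combined_chunk_text(retrieved: list[dict]) -> str:
--     parts: list[str] = []
--     for r in retrieved:
--         parts.append(str(r.get("excerpt") or ""))
--         parts.append(str(r.get("title") or ""))
--         parts.append(str(r.get("path") or ""))
--     return "\n".join(parts).lower()
--
-- def check_must_substrings(
--     retrieved: list[dict], must: list[str]
-- ) -> tuple[bool, list[str]]:
--     if not must:
--         return True, []
--     hay = combined_chunk_text(retrieved)
--     missing: list[str] = []
--     for s in must: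
--         if not s:
--             continue
--         if str(s).lower() not in hay:
--             missing.append(s)
--     return len(missing) == 0, missing
-- ===== SOURCE B (Python) =====
-- def check_must_substrings(
--     retrieved: list[dict], must: list[str]
-- ) -> tuple[bool, list[str]]:
--     if not must:
--         return True, []
--     parts: list[str] = []
--     for r in retrieved:
--         for k in ("excerpt", "title", "path"):
--             parts.append(str(r.get(k) or "").lower())
--     hay = "\n".join(parts)
--     pending = {s.lower() for s in must if s}
--     firsts = {p[0] for p in pending}
--     for j in range(len(hay)):
--         if not pending:
--             break
--         if hay[j] in firsts:
--             pending = {p for p in pending if not hay.startswith(p, j)}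
--     missing = [s for s in must if s and s.lower() in pending]
--     return not missing, missing
-- ===== Notes on version B (the rewrite author's own statement) =====
-- stated objective: alternative
-- what changed: Instead of a separate full-haystack substring search per pattern, B makes one left-to-right scan of the joined lowered haystack, keeping the set of still-unfound lowered patterns and a first-character index: a position is examined only when its character starts some pattern, found patterns are removed, the scan stops early once the set is empty, and the must-entries whose lowered form is still pending are reported in order.
import Mathlib
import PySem

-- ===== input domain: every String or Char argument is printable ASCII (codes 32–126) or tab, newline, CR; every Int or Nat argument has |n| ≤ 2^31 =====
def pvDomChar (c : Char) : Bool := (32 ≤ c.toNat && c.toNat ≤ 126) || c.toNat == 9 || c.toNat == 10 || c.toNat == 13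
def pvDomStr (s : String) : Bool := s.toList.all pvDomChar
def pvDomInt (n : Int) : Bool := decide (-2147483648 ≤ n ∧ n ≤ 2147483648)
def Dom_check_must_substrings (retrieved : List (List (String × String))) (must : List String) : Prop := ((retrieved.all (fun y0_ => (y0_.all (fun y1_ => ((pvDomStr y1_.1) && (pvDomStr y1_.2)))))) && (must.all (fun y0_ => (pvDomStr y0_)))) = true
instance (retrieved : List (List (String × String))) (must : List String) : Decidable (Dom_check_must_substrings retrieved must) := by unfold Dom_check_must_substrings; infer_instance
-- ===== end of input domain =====

-- B replaces A's per-pattern full-haystack substring searches by ONE left-to-right scan of the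
-- haystack that maintains the set of still-unfound lowered patterns (objective: alternative).

-- ===== PORT A =====
-- str(r.get(k) or "")  (values are strings, so str() is the identity; 'or ""' maps a missing
-- key and the empty string to "")
def pvGetOr (r : List (String × String)) (k : String) : String :=
  match PySem.Dict.get? (PySem.Dict.mk r) k with
  | none => ""
  | some v => if v == "" then "" else v

def combined_chunk_text (retrieved : List (List (String × String))) : List Char :=
  let parts := retrieved.foldl (fun parts r =>
    parts ++ [(pvGetOr r "excerpt").toList] ++ [(pvGetOr r "title").toList]
          ++ [(pvGetOr r "path").toList]) []
  PySem.Chars.lower (PySem.Chars.join ['\n'] parts)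

def check_must_substrings (retrieved : List (List (String × String))) (must : List String) : Bool × List String :=
  if must.isEmpty then (true, [])
  else
    let hay := combined_chunk_text retrieved
    let missing := must.foldl (fun missing s =>
      if s == "" then missing                                            -- 'if not s: continue'
      else if !(PySem.Chars.isIn (PySem.Chars.lower s.toList) hay)       -- 'str(s).lower() not in hay'
      then missing ++ [s]
      else missing) []
    (missing.length == 0, missing)

-- ===== PORT B =====
def check_must_substrings_alt (retrieved : List (List (String × String))) (must : List String) : Bool × List String :=
  if must.isEmpty then (true, [])
  else
    let parts := retrieved.foldl (fun parts r =>
      ["excerpt", "title", "path"].foldl (fun parts k =>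
        parts ++ [PySem.Chars.lower (pvGetOr r k).toList]) parts) []
    let hay := PySem.Chars.join ['\n'] parts
    let pending : PySem.Set (List Char) :=
      PySem.Set.ofList ((must.filter (fun s => !(s == ""))).map (fun s => PySem.Chars.lower s.toList))
    -- p[0]: pending's patterns are nonempty (built from truthy strings), so the default is unused
    let firsts : PySem.Set Char := PySem.Set.ofList (pending.map (fun p => p.headD ' '))
    -- 'for j in range(len(hay))' with 'if not pending: break'; hay[j] is hay.getD j (exact:
    -- j < len(hay)); hay.startswith(p, j) for 0 ≤ j < len(hay) is startswith of hay.drop j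
    let pending := (List.range hay.length).foldl (fun pending j =>
      if pending.isEmpty then pending
      else if firsts.contains (hay.getD j ' ')
      then pending.filter (fun p => !(PySem.Chars.startswith (hay.drop j) p))
      else pending) pending
    let missing := must.filter (fun s => !(s == "") && pending.contains (PySem.Chars.lower s.toList))
    (missing.isEmpty, missing)

-- ===== PRECONDITION & SPEC =====
def Spec_check_must_substrings (retrieved : List (List (String × String))) (must : List String) (out : Bool × List String) : Prop := out = check_must_substrings_alt retrieved must
instance (retrieved : List (List (String × String))) (must : List String) (out : Bool × List String) : Decidable (Spec_check_must_substrings retrieved must out) := by unfold Spec_check_must_substrings; infer_instance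

-- ===== CLAIM (what is proved, stated in full; the proofs are below) =====
def Claim_equal_check_must_substrings : Prop := ∀ (retrieved : List (List (String × String))) (must : List String), Dom_check_must_substrings retrieved must → Spec_check_must_substrings retrieved must (check_must_substrings retrieved must)

-- ===== LEMMAS AND PROOFS =====

-- B's parts are A's parts, each lowered
theorem pv_parts_map (retrieved : List (List (String × String))) (acc : List (List Char)) :
    retrieved.foldl (fun parts r =>
      ["excerpt", "title", "path"].foldl (fun parts k =>
        parts ++ [PySem.Chars.lower (pvGetOr r k).toList]) parts) (acc.map PySem.Chars.lower)
    = (retrieved.foldl (fun parts r =>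
        parts ++ [(pvGetOr r "excerpt").toList] ++ [(pvGetOr r "title").toList]
              ++ [(pvGetOr r "path").toList]) acc).map PySem.Chars.lower := by
  induction retrieved generalizing acc with
  | nil => simp
  | cons r rest ih =>
    simp only [List.foldl_cons]
    rw [show (acc.map PySem.Chars.lower ++ [PySem.Chars.lower (pvGetOr r "excerpt").toList]
          ++ [PySem.Chars.lower (pvGetOr r "title").toList]
          ++ [PySem.Chars.lower (pvGetOr r "path").toList])
        = ((acc ++ [(pvGetOr r "excerpt").toList] ++ [(pvGetOr r "title").toList]
            ++ [(pvGetOr r "path").toList]).map PySem.Chars.lower) by simp]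
    exact ih _

-- lowering the '\n'-join = joining the lowered parts ('\n' is fixed by lowerChar)
theorem pv_lower_join (parts : List (List Char)) :
    PySem.Chars.lower (PySem.Chars.join ['\n'] parts)
    = PySem.Chars.join ['\n'] (parts.map PySem.Chars.lower) := by
  induction parts with
  | nil => simp [PySem.Chars.join_nil, PySem.Chars.lower]
  | cons x l ih =>
    cases l with
    | nil => simp [PySem.Chars.join_singleton]
    | cons y l' =>
      have h2 : List.map PySem.Chars.lowerChar ['\n'] = ['\n'] := rfl
      simp only [List.map_cons, PySem.Chars.join_cons_cons, PySem.Chars.lower,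
        List.map_append, h2, List.map_cons] at ih ⊢
      rw [ih]

-- membership in B's pending set after the scan
theorem pv_pending_mem (hay : List Char) (firsts : PySem.Set Char) (js : List Nat)
    (pend : List (List Char)) (p : List Char) :
    p ∈ js.foldl (fun pending j =>
        if pending.isEmpty then pending
        else if firsts.contains (hay.getD j ' ')
        then pending.filter (fun p => !(PySem.Chars.startswith (hay.drop j) p))
        else pending) pend
    ↔ p ∈ pend ∧ ∀ j ∈ js, firsts.contains (hay.getD j ' ') = true → ¬ (p <+: hay.drop j) := by
  induction js generalizing pend with
  | nil => simp
  | cons j js ih =>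
    simp only [List.foldl_cons, ih]
    by_cases h : pend.isEmpty
    · simp [List.isEmpty_iff.mp h]
    · rw [if_neg h]
      by_cases hf : firsts.contains (hay.getD j ' ') = true
      · rw [if_pos hf]
        constructor
        · rintro ⟨hmem, hall⟩
          obtain ⟨hp, hs⟩ := List.mem_filter.mp hmem
          refine ⟨hp, fun i hi => ?_⟩
          rcases List.mem_cons.mp hi with rfl | hi
          · intro _ hpre
            rw [Bool.not_eq_eq_eq_not, Bool.not_true, Bool.eq_false_iff, Ne,
              PySem.Chars.startswith_iff] at hs
            exact hs hpre
          · exact hall i hi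
        · rintro ⟨hp, hall⟩
          refine ⟨List.mem_filter.mpr ⟨hp, ?_⟩, fun i hi => hall i (List.mem_cons.mpr (Or.inr hi))⟩
          rw [Bool.not_eq_eq_eq_not, Bool.not_true, Bool.eq_false_iff, Ne,
            PySem.Chars.startswith_iff]
          exact hall j (List.mem_cons.mpr (Or.inl rfl)) hf
      · rw [if_neg hf]
        constructor
        · rintro ⟨hp, hall⟩
          refine ⟨hp, fun i hi => ?_⟩
          rcases List.mem_cons.mp hi with rfl | hi
          · exact fun hc => absurd hc hf
          · exact hall i hi
        · rintro ⟨hp, hall⟩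
          exact ⟨hp, fun i hi => hall i (List.mem_cons.mpr (Or.inr hi))⟩

-- a match at position j implies j's character is a recorded first character
theorem pv_first_mem (hay p : List Char) (init : List (List Char)) (hp : p ∈ init)
    (j : Nat) (hpre : p <+: hay.drop j) (hne : p ≠ []) :
    (PySem.Set.ofList (init.map (fun q => q.headD ' '))).contains (hay.getD j ' ') = true := by
  obtain ⟨c, p', rfl⟩ : ∃ c p', p = c :: p' := by
    cases p with
    | nil => exact absurd rfl hne
    | cons c p' => exact ⟨c, p', rfl⟩
  have hhead : hay.getD j ' ' = c := by
    obtain ⟨t, ht⟩ := hpre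
    have h2 : hay[j]? = some c := by
      rw [← List.head?_drop, ← ht]
      rfl
    simp [List.getD, h2]
  rw [hhead, PySem.Set.contains_iff, PySem.Set.mem_ofList]
  exact List.mem_map.mpr ⟨c :: p', hp, rfl⟩

-- for a nonempty pattern, 'no occurrence starting below len(hay)' = 'not a substring'
theorem pv_no_occ_iff (hay p : List Char) (hp : p ≠ []) :
    (∀ j ∈ List.range hay.length, ¬ (p <+: hay.drop j)) ↔ PySem.Chars.isIn p hay = false := by
  rw [Bool.eq_false_iff, Ne, ← PySem.Chars.exists_prefix_drop_iff_isIn]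
  simp only [List.mem_range]
  constructor
  · rintro h ⟨j, hj⟩
    by_cases hlt : j < hay.length
    · exact h j hlt hj
    · rw [List.drop_eq_nil_of_le (le_of_not_gt hlt)] at hj
      exact hp (List.prefix_nil.mp hj)
  · intro h j _ hj
    exact h ⟨j, hj⟩

-- A's missing-loop is a filter
theorem pv_missing_filter (hay : List Char) (must : List String) (acc : List String) :
    must.foldl (fun missing s =>
      if s == "" then missing
      else if !(PySem.Chars.isIn (PySem.Chars.lower s.toList) hay)
      then missing ++ [s]
      else missing) acc
    = acc ++ must.filter (fun s =>
        !(s == "") && !(PySem.Chars.isIn (PySem.Chars.lower s.toList) hay)) := by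
  induction must generalizing acc with
  | nil => simp
  | cons s rest ih =>
    by_cases h : s == ""
    · rw [List.foldl_cons, if_pos h, ih, List.filter_cons]
      simp [h]
    · by_cases h2 : PySem.Chars.isIn (PySem.Chars.lower s.toList) hay = true
      · rw [List.foldl_cons, if_neg h, if_neg (by simp [h2]), ih, List.filter_cons]
        simp [h, h2]
      · rw [List.foldl_cons, if_neg h, if_pos (by simp [Bool.eq_false_iff.mpr h2]), ih,
          List.filter_cons]
        simp [h, Bool.eq_false_iff.mpr h2]

-- ===== VERDICT (by name: the statement is the Claim_ definition above) =====
-- the core equality, for an arbitrary haystack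
theorem pv_body (hay : List Char) (must : List String) :
    (((must.foldl (fun missing s =>
        if s == "" then missing
        else if !(PySem.Chars.isIn (PySem.Chars.lower s.toList) hay)
        then missing ++ [s]
        else missing) []).length == 0 : Bool),
      must.foldl (fun missing s =>
        if s == "" then missing
        else if !(PySem.Chars.isIn (PySem.Chars.lower s.toList) hay)
        then missing ++ [s]
        else missing) [])
    = (((must.filter (fun s => !(s == "") &&
          ((List.range hay.length).foldl (fun pending j =>
            if pending.isEmpty then pending
            else if (PySem.Set.ofList ((PySem.Set.ofList ((must.filter (fun s => !(s == ""))).map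
                  (fun s => PySem.Chars.lower s.toList))).map (fun p => p.headD ' '))).contains
                  (hay.getD j ' ')
            then pending.filter (fun p => !(PySem.Chars.startswith (hay.drop j) p))
            else pending)
            (PySem.Set.ofList ((must.filter (fun s => !(s == ""))).map
              (fun s => PySem.Chars.lower s.toList)))).contains
            (PySem.Chars.lower s.toList))).isEmpty : Bool),
        must.filter (fun s => !(s == "") &&
          ((List.range hay.length).foldl (fun pending j =>
            if pending.isEmpty then pending
            else if (PySem.Set.ofList ((PySem.Set.ofList ((must.filter (fun s => !(s == ""))).map
                  (fun s => PySem.Chars.lower s.toList))).map (fun p => p.headD ' '))).contains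
                  (hay.getD j ' ')
            then pending.filter (fun p => !(PySem.Chars.startswith (hay.drop j) p))
            else pending)
            (PySem.Set.ofList ((must.filter (fun s => !(s == ""))).map
              (fun s => PySem.Chars.lower s.toList)))).contains
            (PySem.Chars.lower s.toList))) := by
  rw [pv_missing_filter hay must [], List.nil_append]
  have hfil : must.filter (fun s =>
        !(s == "") && !(PySem.Chars.isIn (PySem.Chars.lower s.toList) hay))
      = must.filter (fun s => !(s == "") &&
          ((List.range hay.length).foldl (fun pending j =>
            if pending.isEmpty then pending
            else if (PySem.Set.ofList ((PySem.Set.ofList ((must.filter (fun s => !(s == ""))).map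
                  (fun s => PySem.Chars.lower s.toList))).map (fun p => p.headD ' '))).contains
                  (hay.getD j ' ')
            then pending.filter (fun p => !(PySem.Chars.startswith (hay.drop j) p))
            else pending)
            (PySem.Set.ofList ((must.filter (fun s => !(s == ""))).map
              (fun s => PySem.Chars.lower s.toList)))).contains
            (PySem.Chars.lower s.toList)) := by
    apply List.filter_congr
    intro s hs
    by_cases h0 : s == ""
    · simp [h0]
    · simp only [h0, Bool.not_false, Bool.true_and]
      have hsne : s ≠ "" := fun hc => by simp [hc] at h0
      have hp : PySem.Chars.lower s.toList ≠ [] := by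
        simp only [PySem.Chars.lower, ne_eq, List.map_eq_nil_iff]
        exact fun hc => hsne (String.toList_eq_nil_iff.mp hc)
      have hmemL : PySem.Chars.lower s.toList ∈
          ((must.filter (fun s => !(s == ""))).map (fun s => PySem.Chars.lower s.toList)) :=
        List.mem_map.mpr ⟨s, List.mem_filter.mpr ⟨hs, by simp [h0]⟩, rfl⟩
      rw [Bool.eq_iff_iff, Bool.not_eq_eq_eq_not, Bool.not_true, Bool.eq_false_iff, Ne,
        PySem.Set.contains_iff, pv_pending_mem, PySem.Set.mem_ofList]
      constructor
      · intro h
        exact ⟨hmemL, fun j hj _ => (pv_no_occ_iff hay _ hp).mpr (Bool.eq_false_iff.mpr h) j hj⟩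
      · intro h
        refine Bool.eq_false_iff.mp ((pv_no_occ_iff hay _ hp).mp (fun j hj hpre => ?_))
        exact h.2 j hj (pv_first_mem hay _ _ ((PySem.Set.mem_ofList _ _).mpr hmemL) j hpre hp) hpre
  rw [← hfil]
  cases must.filter (fun s =>
      !(s == "") && !(PySem.Chars.isIn (PySem.Chars.lower s.toList) hay)) <;> rfl

-- ===== VERDICT (by name: the statement is the Claim_ definition above) =====
theorem check_must_substrings_spec : Claim_equal_check_must_substrings := by
  intro retrieved must _
  unfold Spec_check_must_substrings
  by_cases hm : must.isEmpty
  · simp [check_must_substrings, check_must_substrings_alt, hm]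
  · simp only [check_must_substrings, check_must_substrings_alt, combined_chunk_text, hm,
      Bool.false_eq_true, if_false]
    have hparts := pv_parts_map retrieved []
    simp only [List.map_nil] at hparts
    rw [hparts, ← pv_lower_join]
    exact pv_body _ must
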